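-- pv_equiv track=rewrite | github.com/simonvandevannet/Informatica5 | 10 - Strings/Alfabetische_woorden.py | positie_laagste_ascii
-- ===== SOURCE A (Python) =====
-- def positie_laagste_ascii(woord):
--     positie = 0
--     laagste = ord(woord[0])
--     for i in range(1, len(woord)):
--         if ord(woord[i]) < laagste:
--             laagste = ord(woord[i])
--             positie = i
--     return positie
-- ===== SOURCE B (Python) =====
-- def positie_laagste_ascii(woord):
--     # Find the minimum character, then locate its first occurrence.
--     return woord.index(min(woord))
-- ===== Notes on version B (the rewrite author's own statement) =====
-- stated objective: simpler
-- what changed: Replaces A's single running-min index loop by two built-in passes: min(woord) finds the smallest character, woord.index locates its first occurrence.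
import Mathlib
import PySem

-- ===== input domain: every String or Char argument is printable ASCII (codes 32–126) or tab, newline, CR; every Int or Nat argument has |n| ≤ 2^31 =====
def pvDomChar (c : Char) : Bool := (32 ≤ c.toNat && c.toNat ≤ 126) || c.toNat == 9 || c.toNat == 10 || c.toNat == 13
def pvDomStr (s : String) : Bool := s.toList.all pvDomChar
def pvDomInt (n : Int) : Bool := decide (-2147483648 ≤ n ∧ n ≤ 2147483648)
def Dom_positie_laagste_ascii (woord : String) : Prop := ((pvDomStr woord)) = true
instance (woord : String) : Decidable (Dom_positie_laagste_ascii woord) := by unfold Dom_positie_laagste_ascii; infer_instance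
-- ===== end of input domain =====

-- B replaces A's running-min index loop by two passes (find the minimum character, then its first occurrence): simpler.

-- ===== PORT A =====
-- A: one scan keeping (positie, laagste); woord[i] via pyGetD (the indices from range(1, len(woord))
-- are always in range; the initial woord[0] is in range by Pre_, which excludes the empty string).
def positie_laagste_ascii (woord : String) : Int :=
  let cs := woord.toList
  let st := (PySem.List.pyRange 1 (cs.length : Int) 1).foldl
    (fun (s : Int × Int) i =>
      if (((PySem.List.pyGetD cs i 'a').toNat : Int)) < s.2
      then (i, ((PySem.List.pyGetD cs i 'a').toNat : Int))
      else s)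
    (0, ((PySem.List.pyGetD cs 0 'a').toNat : Int))
  st.1

-- ===== PORT B =====
-- B: min(woord) then woord.index(that character); min/index over the char list are exact for a
-- single-character needle.  On the empty string Python raises (excluded by Pre_).
def positie_laagste_ascii_alt (woord : String) : Int :=
  let cs := woord.toList
  match PySem.List.min? cs (fun c => c) with
  | some m => (((PySem.List.index? cs m).getD 0 : Nat) : Int)
  | none => 0

-- ===== PRECONDITION & SPEC =====
-- Pre_ excludes only the empty string, on which A raises IndexError (and B raises ValueError).
def Pre_positie_laagste_ascii (woord : String) : Prop := woord.toList ≠ []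
instance (woord : String) : Decidable (Pre_positie_laagste_ascii woord) := by unfold Pre_positie_laagste_ascii; infer_instance

def pvWitness_positie_laagste_ascii : String := "bca"

def Spec_positie_laagste_ascii (woord : String) (out : Int) : Prop := out = positie_laagste_ascii_alt woord
instance (woord : String) (out : Int) : Decidable (Spec_positie_laagste_ascii woord out) := by unfold Spec_positie_laagste_ascii; infer_instance

-- ===== CLAIM (what is proved, stated in full; the proofs are below) =====
def Claim_equal_positie_laagste_ascii : Prop := ∀ (woord : String), Dom_positie_laagste_ascii woord → Pre_positie_laagste_ascii woord → Spec_positie_laagste_ascii woord (positie_laagste_ascii woord)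

-- ===== LEMMAS AND PROOFS =====

-- ord of a character, as A's loop sees it
def code (c : Char) : Int := (c.toNat : Int)

-- A's loop body, over Nat indices
def F (cs : List Char) (s : Int × Int) (k : Nat) : Int × Int :=
  if code (cs.getD k 'a') < s.2 then ((k : Int), code (cs.getD k 'a')) else s

-- A's loop invariant: after scanning cs[0..n), (p, l) is (↑k, code cs[k]) where k is the first
-- index attaining the minimum code among cs[0..n).
def FirstMinUpTo (cs : List Char) (n : Nat) (p l : Int) : Prop :=
  ∃ k : Nat, p = (k : Int) ∧ k < n ∧ code (cs.getD k 'a') = l ∧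
    (∀ j < n, l ≤ code (cs.getD j 'a')) ∧
    (∀ j < k, l < code (cs.getD j 'a'))

theorem code_le_of_le {a b : Char} (h : a ≤ b) : code a ≤ code b := by
  rw [Char.le_def] at h
  have : a.toNat ≤ b.toNat := Fin.mk_le_mk.mp h
  simpa [code] using this

theorem char_eq_of_code_eq {a b : Char} (h : code a = code b) : a = b := by
  have : a.toNat = b.toNat := by simpa [code] using h
  exact Char.ext (UInt32.toNat_inj.mp this)

-- A's port, rewritten as the Nat-indexed fold over range' 1 (len-1)
theorem portA_eq_range'_fold (woord : String) :
    positie_laagste_ascii woord =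
      ((List.range' 1 (woord.toList.length - 1)).foldl (F woord.toList)
        (0, code (woord.toList.getD 0 'a'))).1 := by
  unfold positie_laagste_ascii
  dsimp only
  set cs := woord.toList
  rw [PySem.List.pyRange_one]
  have hlen : (((cs.length : Int) - 1)).toNat = cs.length - 1 := by omega
  rw [hlen, List.foldl_map, List.range'_eq_map_range, List.foldl_map]
  congr 2
  · funext s k
    have hcast : (1 : Int) + (k : Int) = ((1 + k : Nat) : Int) := by push_cast; ring
    simp only [hcast, PySem.List.pyGetD_natCast, F, code]
  · rw [show (0 : Int) = ((0 : Nat) : Int) from rfl, PySem.List.pyGetD_natCast]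
    rfl

-- the invariant holds at every prefix
theorem loop_inv (cs : List Char) (m : Nat) (hm : m + 1 ≤ cs.length) :
    FirstMinUpTo cs (m+1)
      ((List.range' 1 m).foldl (F cs) (0, code (cs.getD 0 'a'))).1
      ((List.range' 1 m).foldl (F cs) (0, code (cs.getD 0 'a'))).2 := by
  induction m with
  | zero =>
      refine ⟨0, rfl, Nat.zero_lt_one, rfl, ?_, ?_⟩
      · intro j hj; interval_cases j; exact le_refl _
      · intro j hj; omega
  | succ m ih =>
      have ih' := ih (by omega)
      rw [List.range'_1_concat, List.foldl_append]
      set st := (List.range' 1 m).foldl (F cs) (0, code (cs.getD 0 'a')) with hst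
      obtain ⟨k, hp, hk, hcode, hmin, hfirst⟩ := ih'
      simp only [List.foldl_cons, List.foldl_nil]
      unfold F
      split_ifs with h
      · refine ⟨1 + m, rfl, by omega, rfl, ?_, ?_⟩
        · intro j hj
          rcases Nat.lt_or_ge j (m+1) with hj' | hj'
          · exact le_of_lt (lt_of_lt_of_le h (hcode ▸ hmin j hj'))
          · have : j = 1 + m := by omega
            simp [this]
        · intro j hj
          exact lt_of_lt_of_le h (hcode ▸ hmin j (by omega))
      · refine ⟨k, hp, by omega, hcode, ?_, hfirst⟩
        intro j hj
        rcases Nat.lt_or_ge j (m+1) with hj' | hj'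
        · exact hmin j hj'
        · have : j = 1 + m := by omega
          rw [this]; omega

-- B's port returns exactly the first-argmin position characterised by the invariant
theorem alt_firstmin (cs : List Char) (hcs : cs ≠ []) (p l : Int)
    (h : FirstMinUpTo cs cs.length p l) :
    (match PySem.List.min? cs (fun c => c) with
     | some m => (((PySem.List.index? cs m).getD 0 : Nat) : Int)
     | none => 0) = p := by
  obtain ⟨m, hm⟩ : ∃ m, PySem.List.min? cs (fun c => c) = some m := by
    rcases Option.eq_none_or_eq_some (PySem.List.min? cs (fun c => c)) with h' | h'
    · rw [PySem.List.min?_eq_none_iff] at h'; exact absurd h' hcs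
    · exact h'
  obtain ⟨k, hp, hk, hcode, hmin, hfirst⟩ := h
  rw [List.getD_eq_getElem cs 'a' hk] at hcode
  have hmem := PySem.List.min?_mem hm
  obtain ⟨j, hj, hjm⟩ := List.mem_iff_getElem.mp hmem
  have h1 : l ≤ code m := by
    have := hmin j hj
    rwa [List.getD_eq_getElem cs 'a' hj, hjm] at this
  have h2 : code m ≤ l := by
    have := PySem.List.min?_isMin hm cs[k] (List.getElem_mem hk)
    exact hcode ▸ code_le_of_le this
  have hmv : cs[k] = m := char_eq_of_code_eq (by omega)
  have hidx : PySem.List.index? cs m = some k := by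
    rw [PySem.List.index?_eq_some_iff]
    refine ⟨cs.take k, cs.drop (k+1), ?_, List.length_take_of_le (le_of_lt hk), ?_⟩
    · conv_lhs => rw [← List.take_append_drop k cs]
      rw [List.drop_eq_getElem_cons hk, hmv]
    · intro hmem'
      obtain ⟨j', hj', hjm'⟩ := List.mem_iff_getElem.mp hmem'
      have hj'k : j' < k := by
        have := List.length_take_of_le (le_of_lt hk) ▸ hj'; omega
      have hcj : cs[j'] = m := by
        simpa [List.getElem_take] using hjm'
      have := hfirst j' hj'k
      rw [List.getD_eq_getElem cs 'a' (by omega), hcj] at this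
      omega
  rw [hm]
  show (((PySem.List.index? cs m).getD 0 : Nat) : Int) = p
  rw [hidx, hp]
  rfl

-- ===== VERDICT (by name: the statement is the Claim_ definition above) =====
theorem positie_laagste_ascii_spec : Claim_equal_positie_laagste_ascii := by
  intro woord _ hpre
  unfold Spec_positie_laagste_ascii
  have hcs : woord.toList ≠ [] := hpre
  have hlen : 1 ≤ woord.toList.length := List.length_pos_iff.mpr hcs
  have hinv := loop_inv woord.toList (woord.toList.length - 1) (by omega)
  rw [Nat.sub_add_cancel hlen] at hinv
  have halt := alt_firstmin woord.toList hcs _ _ hinv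
  rw [portA_eq_range'_fold]
  unfold positie_laagste_ascii_alt
  dsimp only
  exact halt.symm
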